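-- pv_equiv track=rewrite | github.com/Ghostx7x/Network | 2b.py | octal_to_hexadecimal
-- ===== SOURCE A (Python) =====
-- def octal_to_hexadecimal(octal):
--     decimal = 0
--     power = 0
--     while octal != 0:
--         last_digit = octal % 10
--         decimal += last_digit * (8 ** power)
--         octal //= 10
--         power += 1
--     hexadecimal = ""
--     hex_digits = "0123456789ABCDEF"
--     while decimal != 0:
--         remainder = decimal % 16
--         hexadecimal = hex_digits[remainder] + hexadecimal
--         decimal //= 16
--     return hexadecimal
-- ===== SOURCE B (Python) =====
-- def octal_to_hexadecimal(octal):
--     decimal = 0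
--     for ch in str(octal):
--         decimal = decimal * 8 + int(ch)
--     out = []
--     while decimal != 0:
--         out.append("0123456789ABCDEF"[decimal % 16])
--         decimal //= 16
--     return "".join(reversed(out))
-- ===== Notes on version B (the rewrite author's own statement) =====
-- stated objective: simpler
-- what changed: Parses the octal value with Horner's method over the characters of str(octal) (no power counter, no repeated 8**power), and builds the hex string by appending remainder digits to a list and joining it reversed instead of repeatedly prepending to a string.
import Mathlib
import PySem

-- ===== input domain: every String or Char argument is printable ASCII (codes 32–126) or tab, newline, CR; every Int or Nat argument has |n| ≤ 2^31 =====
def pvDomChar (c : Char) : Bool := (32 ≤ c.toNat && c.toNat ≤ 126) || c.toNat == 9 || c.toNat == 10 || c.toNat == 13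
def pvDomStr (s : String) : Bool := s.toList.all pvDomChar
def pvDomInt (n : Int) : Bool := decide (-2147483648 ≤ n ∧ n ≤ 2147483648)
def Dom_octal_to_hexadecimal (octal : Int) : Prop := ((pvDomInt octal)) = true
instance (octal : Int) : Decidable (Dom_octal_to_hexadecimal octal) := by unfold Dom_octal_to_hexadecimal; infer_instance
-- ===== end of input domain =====

-- B parses via Horner's method over the characters of str(octal) and builds the hex string by
-- appending remainders then reversing, instead of A's power-weighted digit sum and string prepending.

-- ===== PORT A =====
-- hex_digits[r] as a one-character chunk; r is always a valid index where it is used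
def pvHexDigit (r : Int) : List Char :=
  match PySem.Str.pyGet? "0123456789ABCDEF" r with
  | some c => [c]
  | none => []

-- first while-loop: decimal/power accumulators; fuel bounds the iteration count
-- (octal.natAbs+1 iterations always suffice for nonnegative octal; a negative octal never terminates in Python and is outside Pre_)
def pvAParse (fuel : Nat) (octal decimal : Int) (power : Nat) : Int :=
  match fuel with
  | 0 => decimal
  | f + 1 =>
    if octal = 0 then decimal
    else pvAParse f (PySem.Int.floordiv octal 10)
           (decimal + PySem.Int.mod octal 10 * (8 : Int) ^ power) (power + 1)

-- second while-loop: hexadecimal built by prepending hex_digits[remainder]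
def pvAHex (fuel : Nat) (decimal : Int) (hexadecimal : List Char) : List Char :=
  match fuel with
  | 0 => hexadecimal
  | f + 1 =>
    if decimal = 0 then hexadecimal
    else pvAHex f (PySem.Int.floordiv decimal 16)
           (pvHexDigit (PySem.Int.mod decimal 16) ++ hexadecimal)

def octal_to_hexadecimal (octal : Int) : String :=
  let decimal := pvAParse (octal.natAbs + 1) octal 0 0
  String.ofList (pvAHex (decimal.natAbs + 1) decimal [])

-- ===== PORT B =====
-- int(ch) for a single character: exact as code-point minus 48 on the decimal-digit characters
-- produced by str(octal) for octal ≥ 0 (negative octal, where int('-') raises, is outside Pre_)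
def pvIntOfDigitChar (c : Char) : Int := (c.toNat : Int) - 48

-- for ch in str(octal): decimal = decimal * 8 + int(ch)
def pvBDecimal (octal : Int) : Int :=
  (PySem.Int.toStr octal).toList.foldl (fun a c => a * 8 + pvIntOfDigitChar c) 0

-- while decimal != 0: out.append(hex_digits[decimal % 16]); decimal //= 16
def pvBHexLoop (fuel : Nat) (decimal : Int) (out : List Char) : List Char :=
  match fuel with
  | 0 => out
  | f + 1 =>
    if decimal = 0 then out
    else pvBHexLoop f (PySem.Int.floordiv decimal 16)
           (out ++ pvHexDigit (PySem.Int.mod decimal 16))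

-- "".join(reversed(out))
def octal_to_hexadecimal_alt (octal : Int) : String :=
  let d := pvBDecimal octal
  String.ofList (pvBHexLoop (d.natAbs + 1) d []).reverse

-- ===== PRECONDITION & SPEC =====
-- Pre_ excludes negative octal: there A's first while-loop never terminates (floor division by ten stabilises at minus one), so A returns nothing.
def Pre_octal_to_hexadecimal (octal : Int) : Prop := 0 ≤ octal
instance (octal : Int) : Decidable (Pre_octal_to_hexadecimal octal) := by
  unfold Pre_octal_to_hexadecimal; infer_instance

def pvWitness_octal_to_hexadecimal : Int := (83)

def Spec_octal_to_hexadecimal (octal : Int) (out : String) : Prop := out = octal_to_hexadecimal_alt octal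
instance (octal : Int) (out : String) : Decidable (Spec_octal_to_hexadecimal octal out) := by unfold Spec_octal_to_hexadecimal; infer_instance

-- ===== CLAIM (what is proved, stated in full; the proofs are below) =====
def Claim_equal_octal_to_hexadecimal : Prop := ∀ (octal : Int), Dom_octal_to_hexadecimal octal → Pre_octal_to_hexadecimal octal → Spec_octal_to_hexadecimal octal (octal_to_hexadecimal octal)

-- ===== LEMMAS AND PROOFS =====

-- proof-side Horner recursion on Int, the common value of both parsing loops
def pvH (fuel : Nat) (n : Int) : Int :=
  match fuel with
  | 0 => 0
  | f + 1 =>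
    if n = 0 then 0
    else 8 * pvH f (PySem.Int.floordiv n 10) + PySem.Int.mod n 10

theorem pv_parse_eq (fuel : Nat) :
    ∀ (n d : Int) (p : Nat), 0 ≤ n → n < (10 : Int) ^ fuel →
      pvAParse fuel n d p = d + pvH fuel n * (8 : Int) ^ p := by
  induction fuel with
  | zero =>
    intro n d p hn hlt
    have : n = 0 := by norm_num at hlt; omega
    simp [pvAParse, pvH]
  | succ f ih =>
    intro n d p hn hlt
    simp only [pvAParse, pvH]
    split_ifs with h
    · simp
    · have h10 : (0:Int) < 10 := by norm_num
      rw [PySem.Int.floordiv_eq_ediv_of_pos h10, PySem.Int.mod_eq_emod_of_pos h10]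
      have hdivnn : 0 ≤ n / 10 := Int.ediv_nonneg hn (by norm_num)
      have hdivlt : n / 10 < (10 : Int) ^ f := by
        have hpow : (10 : Int) ^ (f + 1) = 10 ^ f * 10 := by ring
        have := Int.ediv_lt_iff_lt_mul (a := n) (b := (10 : Int) ^ f) h10
        exact this.mpr (by rw [← hpow]; exact hlt)
      rw [ih (n / 10) (d + n % 10 * 8 ^ p) (p + 1) hdivnn hdivlt]
      ring

-- MSB-first decimal digit characters of a natural number
def pvDigitsChars (m : Nat) : List Char :=
  if h : m < 10 then [Nat.digitChar m]
  else pvDigitsChars (m / 10) ++ [Nat.digitChar (m % 10)]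
decreasing_by exact Nat.div_lt_self (by omega) (by omega)

theorem pv_toDigitsCore_eq (fuel : Nat) :
    ∀ (m : Nat) (ds : List Char), m < fuel →
      Nat.toDigitsCore 10 fuel m ds = pvDigitsChars m ++ ds := by
  induction fuel with
  | zero => intro m ds h; omega
  | succ f ih =>
    intro m ds h
    simp only [Nat.toDigitsCore]
    split_ifs with h0
    · have hm : m < 10 := by omega
      rw [pvDigitsChars, dif_pos hm]
      have : m % 10 = m := Nat.mod_eq_of_lt hm
      simp [this]
    · have hm : ¬ m < 10 := by
        intro hc; exact h0 (Nat.div_eq_of_lt hc)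
      have hlt : m / 10 < f := by
        have := Nat.div_lt_self (n := m) (by omega) (by omega : 1 < 10)
        omega
      rw [ih (m / 10) (Nat.digitChar (m % 10) :: ds) hlt]
      conv_rhs => rw [pvDigitsChars]
      rw [dif_neg hm]
      simp

theorem pv_digitChar_val (d : Nat) (hd : d < 10) :
    pvIntOfDigitChar (Nat.digitChar d) = (d : Int) := by
  interval_cases d <;> decide

-- Horner fold over the MSB-first digit characters equals pvH
theorem pv_horner_digits (m : Nat) :
    ∀ (fuel : Nat), (m : Int) < (10 : Int) ^ fuel →
      (pvDigitsChars m).foldl (fun a c => a * 8 + pvIntOfDigitChar c) 0 = pvH fuel (m : Int) := by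
  induction m using Nat.strong_induction_on with
  | _ m ih =>
    intro fuel hfuel
    by_cases hm : m < 10
    · rw [pvDigitsChars, dif_pos hm]
      simp only [List.foldl_cons, List.foldl_nil, zero_mul, zero_add]
      rw [pv_digitChar_val m hm]
      cases fuel with
      | zero => simp only [pvH]; norm_num at hfuel; omega
      | succ f =>
        simp only [pvH]
        split_ifs with h0
        · simp [h0]
        · have h10 : (0:Int) < 10 := by norm_num
          rw [PySem.Int.floordiv_eq_ediv_of_pos h10, PySem.Int.mod_eq_emod_of_pos h10]
          have hd : (m : Int) / 10 = 0 := by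
            apply Int.ediv_eq_zero_of_lt <;> [positivity; exact_mod_cast hm]
          rw [hd]
          have hz : ∀ g, pvH g 0 = 0 := by intro g; cases g <;> simp [pvH]
          rw [hz]
          have hmi : (m : Int) < 10 := by exact_mod_cast hm
          omega
    · rw [pvDigitsChars, dif_neg hm]
      rw [List.foldl_append]
      simp only [List.foldl_cons, List.foldl_nil]
      have hstep : m / 10 < m := Nat.div_lt_self (by omega) (by omega)
      cases fuel with
      | zero => norm_num at hfuel; omega
      | succ f =>
        have h10 : (0:Int) < 10 := by norm_num
        have hdivlt : ((m / 10 : Nat) : Int) < (10 : Int) ^ f := by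
          have hcast : ((m / 10 : Nat) : Int) = (m : Int) / 10 := by omega
          rw [hcast]
          have := Int.ediv_lt_iff_lt_mul (a := (m : Int)) (b := (10 : Int) ^ f) h10
          exact this.mpr (by rw [pow_succ] at hfuel; exact hfuel)
        rw [ih (m / 10) hstep f hdivlt]
        simp only [pvH]
        have hne : ¬ (m : Int) = 0 := by omega
        rw [if_neg hne]
        rw [PySem.Int.floordiv_eq_ediv_of_pos h10, PySem.Int.mod_eq_emod_of_pos h10]
        have hcast : ((m / 10 : Nat) : Int) = (m : Int) / 10 := by omega
        have hmod : pvIntOfDigitChar (Nat.digitChar (m % 10)) = (m : Int) % 10 := by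
          rw [pv_digitChar_val (m % 10) (Nat.mod_lt m (by omega))]
          omega
        rw [hmod, ← hcast]
        ring

theorem pv_lt_pow (b : Nat) (hb : 1 < b) (n : Int) (hn : 0 ≤ n) :
    n < (b : Int) ^ (n.natAbs + 1) := by
  have h1 : n.natAbs < b ^ n.natAbs := Nat.lt_pow_self hb (n := n.natAbs)
  have h2 : b ^ n.natAbs ≤ b ^ (n.natAbs + 1) :=
    Nat.pow_le_pow_right (by omega) (by omega)
  have : n.natAbs < b ^ (n.natAbs + 1) := lt_of_lt_of_le h1 h2
  calc n = (n.natAbs : Int) := by omega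
    _ < ((b ^ (n.natAbs + 1) : Nat) : Int) := by exact_mod_cast this
    _ = (b : Int) ^ (n.natAbs + 1) := by push_cast; ring

-- B's decimal equals pvH at any sufficient fuel
theorem pvBDecimal_eq (n : Int) (hn : 0 ≤ n) (fuel : Nat) (hfuel : n < (10 : Int) ^ fuel) :
    pvBDecimal n = pvH fuel n := by
  unfold pvBDecimal
  have hchars : (PySem.Int.toStr n).toList = pvDigitsChars n.toNat := by
    rw [PySem.Int.toList_toStr]
    unfold PySem.Int.toChars
    rw [if_neg (by omega)]
    unfold Nat.toDigits
    rw [pv_toDigitsCore_eq (n.toNat + 1) n.toNat [] (by omega)]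
    simp
  rw [hchars]
  have hcast : ((n.toNat : Int)) = n := by omega
  have := pv_horner_digits n.toNat fuel (by rw [hcast]; exact hfuel)
  rw [hcast] at this
  exact this

-- the two hex loops produce reversed lists of one another
theorem pv_hex_rev (fuel : Nat) :
    ∀ (n : Int) (acc : List Char), (pvBHexLoop fuel n acc).reverse = pvAHex fuel n acc.reverse := by
  induction fuel with
  | zero => intro n acc; simp [pvBHexLoop, pvAHex]
  | succ f ih =>
    intro n acc
    simp only [pvBHexLoop, pvAHex]
    split_ifs with h
    · rfl
    · rw [ih]
      have hrev : (acc ++ pvHexDigit (PySem.Int.mod n 16)).reverse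
          = pvHexDigit (PySem.Int.mod n 16) ++ acc.reverse := by
        rw [List.reverse_append]
        congr 1
        unfold pvHexDigit
        cases PySem.Str.pyGet? "0123456789ABCDEF" (PySem.Int.mod n 16) <;> simp
      rw [hrev]

-- ===== VERDICT (by name: the statement is the Claim_ definition above) =====
theorem octal_to_hexadecimal_spec : Claim_equal_octal_to_hexadecimal := by
  intro octal _ hpre
  unfold Spec_octal_to_hexadecimal octal_to_hexadecimal octal_to_hexadecimal_alt
  dsimp only
  have hfuel := pv_lt_pow 10 (by norm_num) octal hpre
  have hdec : pvAParse (octal.natAbs + 1) octal 0 0 = pvBDecimal octal := by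
    rw [pv_parse_eq (octal.natAbs + 1) octal 0 0 hpre hfuel,
        pvBDecimal_eq octal hpre (octal.natAbs + 1) hfuel]
    ring
  rw [hdec]
  rw [pv_hex_rev ((pvBDecimal octal).natAbs + 1) (pvBDecimal octal) []]
  simp
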